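-- pv_equiv track=rewrite | github.com/google/paranoid_crypto | paranoid_crypto/lib/randomness_tests/util.py | _BinaryMatrixRankSmall
-- ===== SOURCE A (Python) =====
-- def _BinaryMatrixRankSmall(matrix: list[int]) -> int:
--   """Computes the rank of a binary matrix.
--
--   This implementation is used for small matrices.
--
--   Args:
--     matrix: the binary matrix represented as a list of rows.
--
--   Returns:
--     the rank of the matrix
--   """
--   m = matrix[:]
--   rank = 0
--   for i in range(len(m)):
--     if m[i]:
--       rank += 1
--       msb = 1 << (m[i].bit_length() - 1)
--       for j in range(i + 1, len(m)):
--         if m[j] & msb: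
--           m[j] ^= m[i]
--   return rank
-- ===== SOURCE B (Python) =====
-- def _BinaryMatrixRankSmall(matrix: list[int]) -> int:
--   """Rank via lazy reduction: each row is reduced against an append-only
--   pivot list (msb mask, pivot value) instead of eagerly eliminating into
--   the remaining rows in place."""
--   pivots = []
--   for x in matrix:
--     cur = x
--     for msb, v in pivots:
--       if cur & msb:
--         cur ^= v
--     if cur:
--       pivots.append((1 << (cur.bit_length() - 1), cur))
--   return len(pivots)
-- ===== Notes on version B (the rewrite author's own statement) =====
-- stated objective: simpler
-- what changed: Replaces the in-place triangular elimination (outer index loop that eagerly XORs each pivot into all later rows of a mutated copy) by a single pass that lazily reduces each row against an append-only pivot list of (msb mask, pivot) pairs and returns the pivot count; the input is never copied or mutated.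
import Mathlib
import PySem

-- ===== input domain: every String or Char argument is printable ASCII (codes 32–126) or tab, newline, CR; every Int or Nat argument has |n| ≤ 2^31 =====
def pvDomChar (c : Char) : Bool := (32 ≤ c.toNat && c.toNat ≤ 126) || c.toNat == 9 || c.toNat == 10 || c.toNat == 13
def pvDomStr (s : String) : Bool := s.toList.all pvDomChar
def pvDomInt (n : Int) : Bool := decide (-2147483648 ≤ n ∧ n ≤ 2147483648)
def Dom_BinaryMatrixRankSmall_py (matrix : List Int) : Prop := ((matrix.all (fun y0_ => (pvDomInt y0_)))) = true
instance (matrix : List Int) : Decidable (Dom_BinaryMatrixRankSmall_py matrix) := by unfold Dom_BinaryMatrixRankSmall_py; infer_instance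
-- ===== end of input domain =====

-- B replaces A's in-place triangular elimination by a lazy per-row reduction
-- against an append-only pivot list (objective: simpler; same asymptotic cost).

-- ===== PORT A =====
-- Body of A's outer loop over i (helper of the port): if m[i] is truthy,
-- rank += 1, msb = 1 << (m[i].bit_length() - 1), then the inner loop over
-- j in range(i+1, len(m)) does m[j] ^= m[i] on rows with m[j] & msb.
-- len(m) is constant (element assignment keeps the length) and m[i] is not
-- changed by the inner loop (j > i), so both are read once per outer step.
def pvABody (n : Int) (st : List Int × Int) (i : Int) : List Int × Int :=
  let mi := PySem.List.pyGetD st.1 i 0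
  if mi ≠ 0 then
    let msb : Int := (1 : Int) <<< (PySem.Int.bitLength mi - 1)
    let m' :=
      (PySem.List.pyRange (i + 1) n 1).foldl
        (fun m j =>
          if PySem.Int.band (PySem.List.pyGetD m j 0) msb ≠ 0 then
            PySem.List.pySetD m j (PySem.Int.bxor (PySem.List.pyGetD m j 0) mi)
          else m)
        st.1
    (m', st.2 + 1)
  else (st.1, st.2)

-- Literal port of A: m = matrix[:]; rank = 0; for i in range(len(m)): pvABody.
def BinaryMatrixRankSmall_py (matrix : List Int) : Int :=
  let m0 := PySem.List.slice matrix none none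
  let n : Int := PySem.List.len m0
  ((PySem.List.pyRange 0 n 1).foldl (pvABody n) (m0, (0 : Int))).2

-- ===== PORT B =====
-- Literal port of B: fold over the rows; reduce each row against the pivot
-- list in order; append (msb mask, reduced row) when the residue is nonzero.
def BinaryMatrixRankSmall_py_alt (matrix : List Int) : Int :=
  let pivots :=
    matrix.foldl
      (fun (pivots : List (Int × Int)) x =>
        let cur :=
          pivots.foldl
            (fun cur p =>
              if PySem.Int.band cur p.1 ≠ 0 then PySem.Int.bxor cur p.2 else cur)
            x
        if cur ≠ 0 then
          pivots ++ [((1 : Int) <<< (PySem.Int.bitLength cur - 1), cur)]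
        else pivots)
      []
  PySem.List.len pivots

-- ===== PRECONDITION & SPEC =====
def Spec_BinaryMatrixRankSmall_py (matrix : List Int) (out : Int) : Prop := out = BinaryMatrixRankSmall_py_alt matrix
instance (matrix : List Int) (out : Int) : Decidable (Spec_BinaryMatrixRankSmall_py matrix out) := by unfold Spec_BinaryMatrixRankSmall_py; infer_instance

-- ===== CLAIM (what is proved, stated in full; the proofs are below) =====
def Claim_equal_BinaryMatrixRankSmall_py : Prop := ∀ (matrix : List Int), Dom_BinaryMatrixRankSmall_py matrix → Spec_BinaryMatrixRankSmall_py matrix (BinaryMatrixRankSmall_py matrix)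

-- ===== LEMMAS AND PROOFS =====

-- One reduction step of B: XOR the pivot in when its msb mask hits cur.
def pvStep (cur : Int) (p : Int × Int) : Int :=
  if PySem.Int.band cur p.1 ≠ 0 then PySem.Int.bxor cur p.2 else cur

-- Reduce x against the pivot list in order (B's inner loop).
def pvRed (ps : List (Int × Int)) (x : Int) : Int := ps.foldl pvStep x

-- B's outer-loop body on the pivot list alone.
def pvBStep (ps : List (Int × Int)) (x : Int) : List (Int × Int) :=
  let cur := pvRed ps x
  if cur ≠ 0 then ps ++ [((1 : Int) <<< (PySem.Int.bitLength cur - 1), cur)] else ps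

theorem pvRed_append (ps : List (Int × Int)) (q : Int × Int) (x : Int) :
    pvRed (ps ++ [q]) x = pvStep (pvRed ps x) q := by
  simp [pvRed]

theorem pvAlt_eq (matrix : List Int) :
    BinaryMatrixRankSmall_py_alt matrix = ((matrix.foldl pvBStep []).length : Int) := rfl

theorem pvGetD_mid (pre suf : List Int) (y d : Int) :
    PySem.List.pyGetD (pre ++ y :: suf) (pre.length : Int) d = y := by
  simp [PySem.List.pyGetD_natCast, List.getD_eq_getElem?_getD]

theorem pvSetD_mid (pre suf : List Int) (y v : Int) :
    PySem.List.pySetD (pre ++ y :: suf) (pre.length : Int) v = pre ++ v :: suf := by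
  rw [PySem.List.pySetD_natCast]
  induction pre with
  | nil => simp
  | cons a t ih => simp [ih]

-- A's inner loop over j in range(|pre|, |pre|+|suf|) maps pvStep · (msb, mi)
-- over the suffix and leaves the prefix alone.
theorem pvInner (msb mi : Int) :
    ∀ (suf pre : List Int),
      (PySem.List.pyRange (pre.length : Int) ((pre.length : Int) + (suf.length : Int)) 1).foldl
        (fun m j =>
          if PySem.Int.band (PySem.List.pyGetD m j 0) msb ≠ 0 then
            PySem.List.pySetD m j (PySem.Int.bxor (PySem.List.pyGetD m j 0) mi)
          else m)
        (pre ++ suf)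
      = pre ++ suf.map (fun y => pvStep y (msb, mi)) := by
  intro suf
  induction suf with
  | nil => intro pre; simp [PySem.List.pyRange_one_eq_nil]
  | cons y rest ih =>
    intro pre
    rw [PySem.List.pyRange_one_cons (by push_cast [List.length_cons]; omega)]
    simp only [List.foldl_cons]
    have hbody :
        (if PySem.Int.band (PySem.List.pyGetD (pre ++ y :: rest) (pre.length : Int) 0) msb ≠ 0 then
            PySem.List.pySetD (pre ++ y :: rest) (pre.length : Int)
              (PySem.Int.bxor (PySem.List.pyGetD (pre ++ y :: rest) (pre.length : Int) 0) mi)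
          else (pre ++ y :: rest))
        = (pre ++ [pvStep y (msb, mi)]) ++ rest := by
      rw [pvGetD_mid]
      split_ifs with h
      · rw [pvSetD_mid]; simp [pvStep, h]
      · simp [pvStep, h]
    rw [hbody]
    have harg1 : ((pre.length : Int) + 1) = (((pre ++ [pvStep y (msb, mi)]).length : Nat) : Int) := by
      simp
    have harg2 : ((pre.length : Int) + ((y :: rest).length : Int))
        = (((pre ++ [pvStep y (msb, mi)]).length : Nat) : Int) + ((rest.length : Nat) : Int) := by
      push_cast [List.length_cons, List.length_append, List.length_nil]; omega
    rw [harg1, harg2, ih (pre ++ [pvStep y (msb, mi)])]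
    simp

-- The outer body at index |pre| when the current row is zero: no change.
theorem pvABody_zero (n : Int) (pre rest : List Int) (r : Int) :
    pvABody n (pre ++ (0 : Int) :: rest, r) (pre.length : Int) = (pre ++ (0 : Int) :: rest, r) := by
  unfold pvABody
  rw [pvGetD_mid]
  simp

-- The outer body at index |pre| on a nonzero row y: rank + 1 and the suffix
-- gets one pvStep (msb, y) application.
theorem pvABody_ne (n : Int) (pre rest : List Int) (r y : Int) (hy : y ≠ 0)
    (hn : n = (pre.length : Int) + 1 + (rest.length : Int)) :
    pvABody n (pre ++ y :: rest, r) (pre.length : Int)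
      = ((pre ++ [y]) ++ rest.map
          (fun z => pvStep z ((1 : Int) <<< (PySem.Int.bitLength y - 1), y)), r + 1) := by
  unfold pvABody
  rw [pvGetD_mid]
  simp only [hy, ne_eq, not_false_eq_true, if_true]
  have hb1 : ((pre.length : Int) + 1) = (((pre ++ [y]).length : Nat) : Int) := by simp
  have hb2 : n = (((pre ++ [y]).length : Nat) : Int) + ((rest.length : Nat) : Int) := by
    rw [hn]; simp
  have hsplit : pre ++ y :: rest = (pre ++ [y]) ++ rest := by simp
  rw [hb1, hb2, hsplit, pvInner ((1 : Int) <<< (PySem.Int.bitLength y - 1)) y rest (pre ++ [y])]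

-- Main invariant: starting at index |pre| with the suffix rows already reduced
-- by the pivots ps and rank = |ps|, A's outer loop returns |rows.foldl pvBStep ps|.
theorem pvMain (n : Int) :
    ∀ (rows pre : List Int) (ps : List (Int × Int)),
      n = (pre.length : Int) + (rows.length : Int) →
      ((PySem.List.pyRange (pre.length : Int) n 1).foldl (pvABody n)
          (pre ++ rows.map (pvRed ps), (ps.length : Int))).2
        = ((rows.foldl pvBStep ps).length : Int) := by
  intro rows
  induction rows with
  | nil =>
    intro pre ps hn
    rw [PySem.List.pyRange_one_eq_nil (by simp at hn; omega)]
    simp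
  | cons x rest ih =>
    intro pre ps hn
    simp only [List.length_cons] at hn
    push_cast at hn
    rw [PySem.List.pyRange_one_cons (by omega)]
    simp only [List.foldl_cons, List.map_cons]
    by_cases hz : pvRed ps x = 0
    · -- row reduces to zero: both sides skip it
      rw [hz, pvABody_zero]
      have hsplit : pre ++ (0 : Int) :: rest.map (pvRed ps)
          = (pre ++ [(0 : Int)]) ++ rest.map (pvRed ps) := by simp
      have harg : ((pre.length : Int) + 1) = (((pre ++ [(0 : Int)]).length : Nat) : Int) := by simp
      have hB : pvBStep ps x = ps := by simp [pvBStep, hz]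
      rw [hsplit, harg, ih (pre ++ [(0 : Int)]) ps (by simp; omega), hB]
    · -- nonzero residue: A eliminates into the suffix, B appends the pivot
      set cur := pvRed ps x with hcur
      set msb : Int := (1 : Int) <<< (PySem.Int.bitLength cur - 1) with hmsb
      rw [pvABody_ne n pre (rest.map (pvRed ps)) (ps.length : Int) cur hz
        (by simp; omega)]
      have hmap : (rest.map (pvRed ps)).map (fun z => pvStep z (msb, cur))
          = rest.map (pvRed (ps ++ [(msb, cur)])) := by
        rw [List.map_map]
        apply List.map_congr_left
        intro z _
        simp [pvRed_append]
      have harg : ((pre.length : Int) + 1) = (((pre ++ [cur]).length : Nat) : Int) := by simp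
      have hlen : ((ps.length : Int) + 1) = ((((ps ++ [(msb, cur)]).length : Nat)) : Int) := by simp
      have hB : pvBStep ps x = ps ++ [(msb, cur)] := by
        simp [pvBStep, ← hcur, hz, hmsb]
      rw [hmap, harg, hlen, ih (pre ++ [cur]) (ps ++ [(msb, cur)]) (by simp; omega), hB]

-- ===== VERDICT (by name: the statement is the Claim_ definition above) =====
theorem BinaryMatrixRankSmall_py_spec : Claim_equal_BinaryMatrixRankSmall_py := by
  intro matrix _
  show BinaryMatrixRankSmall_py matrix = BinaryMatrixRankSmall_py_alt matrix
  rw [pvAlt_eq]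
  have h := pvMain (matrix.length : Int) matrix [] [] (by simp only [List.length_nil, Nat.cast_zero, zero_add])
  have hm : matrix.map (pvRed []) = matrix := by
    have hid : pvRed [] = id := funext (fun x => rfl)
    rw [hid, List.map_id]
  rw [List.nil_append, hm] at h
  simpa [BinaryMatrixRankSmall_py, PySem.List.slice_none_none, PySem.List.len_eq] using h
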